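-- pv_equiv track=rewrite | github.com/james5635/GeekForGeek-Data-Structure-and-Algorithm | searching/missing_repeating/count_1s_binary_array/solution.py | count_ones_linear
-- ===== SOURCE A (Python) =====
-- def count_ones_linear(arr):
--     """
--     Count ones using linear search (for comparison).
--
--     Time Complexity: O(n)
--     Space Complexity: O(1)
--
--     Args:
--         arr: Sorted binary array
--
--     Returns:
--         Count of 1s
--     """
--     count = 0
--     for num in reversed(arr):
--         if num == 1:
--             count += 1
--         else:
--             break
--     return count
-- ===== SOURCE B (Python) =====
-- def count_ones_linear(arr):
--     """Count of 1s in the trailing run: one forward pass, counter resets on any non-1."""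
--     run = 0
--     for num in arr:
--         run = run + 1 if num == 1 else 0
--     return run
-- ===== Notes on version B (the rewrite author's own statement) =====
-- stated objective: alternative
-- what changed: Replaces the reversed-iteration loop with break by a single forward fold whose counter resets to 0 on any non-1, maintaining the length of the current run of 1s.
import Mathlib
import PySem

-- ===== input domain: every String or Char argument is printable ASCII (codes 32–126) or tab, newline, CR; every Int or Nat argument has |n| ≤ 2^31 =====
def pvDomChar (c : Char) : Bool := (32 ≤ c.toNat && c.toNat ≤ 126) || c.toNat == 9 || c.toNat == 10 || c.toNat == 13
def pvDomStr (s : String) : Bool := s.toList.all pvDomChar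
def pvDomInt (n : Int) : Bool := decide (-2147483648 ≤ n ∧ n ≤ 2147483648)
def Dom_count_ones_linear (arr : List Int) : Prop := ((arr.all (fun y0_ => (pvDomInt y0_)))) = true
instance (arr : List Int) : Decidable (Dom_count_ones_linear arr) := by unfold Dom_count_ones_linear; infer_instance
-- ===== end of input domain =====

-- B replaces A's reversed loop-with-break by one forward fold whose counter resets on non-1 (alternative, same cost).

-- ===== PORT A =====
-- loop state: (count, broken); the break is modelled by the Bool flag that freezes the state
def count_ones_linear_step (st : Int × Bool) (num : Int) : Int × Bool :=
  if st.2 then st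
  else if num == 1 then (st.1 + 1, false)
  else (st.1, true)

def count_ones_linear (arr : List Int) : Int :=
  (arr.reverse.foldl count_ones_linear_step (0, false)).1

-- ===== PORT B =====
def count_ones_linear_alt (arr : List Int) : Int :=
  arr.foldl (fun run num => if num == 1 then run + 1 else 0) 0

-- ===== PRECONDITION & SPEC =====
def Spec_count_ones_linear (arr : List Int) (out : Int) : Prop := out = count_ones_linear_alt arr
instance (arr : List Int) (out : Int) : Decidable (Spec_count_ones_linear arr out) := by unfold Spec_count_ones_linear; infer_instance

-- ===== CLAIM (what is proved, stated in full; the proofs are below) =====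
def Claim_equal_count_ones_linear : Prop := ∀ (arr : List Int), Dom_count_ones_linear arr → Spec_count_ones_linear arr (count_ones_linear arr)

-- ===== LEMMAS AND PROOFS =====

-- prefix-run of 1s, the common characterisation
def pvPref : List Int → Int
  | [] => 0
  | x :: xs => if x == 1 then 1 + pvPref xs else 0

theorem pvA_stopped (l : List Int) (c : Int) :
    l.foldl count_ones_linear_step (c, true) = (c, true) := by
  induction l with
  | nil => rfl
  | cons x xs ih => simpa [List.foldl, count_ones_linear_step] using ih

theorem pvA_run (l : List Int) (c : Int) :
    (l.foldl count_ones_linear_step (c, false)).1 = c + pvPref l := by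
  induction l generalizing c with
  | nil => simp [pvPref]
  | cons x xs ih =>
    by_cases hx : x = 1
    · simp [List.foldl, count_ones_linear_step, hx, pvPref, ih]; ring
    · simp [List.foldl, count_ones_linear_step, hx, pvPref, pvA_stopped]

theorem pvB_pref (l : List Int) :
    count_ones_linear_alt l = pvPref l.reverse := by
  induction l using List.reverseRecOn with
  | nil => rfl
  | append_singleton xs x ih =>
    by_cases hx : x = 1
    · simp [count_ones_linear_alt, List.foldl_append, hx, pvPref] at *
      simpa [ih] using by ring
    · simp [count_ones_linear_alt, List.foldl_append, hx, pvPref]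

-- ===== VERDICT (by name: the statement is the Claim_ definition above) =====
theorem count_ones_linear_spec : Claim_equal_count_ones_linear := by
  intro arr _
  unfold Spec_count_ones_linear count_ones_linear
  rw [pvB_pref, pvA_run]
  simp
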